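-- pv_equiv track=rewrite | github.com/Pillangocska/f5369168-a166-42f9-a4fc-0d369273b86c | task_1_dungeon/dungeon.py | solve_dungeon
-- ===== SOURCE A (Python) =====
-- from typing import List, Optional, Set, Tuple
-- from collections import deque
--
-- MOVE_DISTANCES: List[int] = [1, 2, 3, 5]
--
-- def solve_dungeon(dungeon: List[int]) -> Tuple[Optional[int], List[int]]:
--     """Find the minimum number of moves to escape the dungeon.
--
--     Uses breadth-first search to guarantee the shortest path. At each
--     position the knight tries all allowed move distances. The first
--     path that reaches or overshoots the last platform is optimal.
--
--     Args:
--         dungeon: List of 0s and 1s where 1 represents a marble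
--             platform and 0 represents a lava pool.
--
--     Returns:
--         A tuple of (move_count, path) where path uses 1-based
--         positions. If no solution exists, returns (None, [1]).
--     """
--     n: int = len(dungeon)
--     goal: int = n - 1  # 0-based index of the last platform
--
--     # Edge case: dungeon has only one platform (already at the end)
--     if goal == 0:
--         return (0, [1])
--
--     # BFS setup: queue stores (current_index, path_so_far)
--     queue: deque[Tuple[int, List[int]]] = deque([(0, [0])])
--     visited: Set[int] = {0}
--
--     while queue:
--         position, path = queue.popleft()
--
--         for distance in MOVE_DISTANCES:
--             next_pos: int = position + distance
--
--             # Landing on or jumping beyond the last platform counts as escape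
--             if next_pos >= goal:
--                 final_path: List[int] = path + [max(next_pos, goal)]
--                 return (len(path), [p + 1 for p in final_path])
--
--             # Only step on marble platforms we haven't visited yet
--             if (next_pos < n
--                     and dungeon[next_pos] == 1
--                     and next_pos not in visited):
--                 visited.add(next_pos)
--                 queue.append((next_pos, path + [next_pos]))
--
--     # No path reaches the end
--     return (None, [1])
-- ===== SOURCE B (Python) =====
-- from typing import List, Optional, Tuple
--
-- MOVE_DISTANCES: List[int] = [1, 2, 3, 5]
--
-- def solve_dungeon(dungeon: List[int]) -> Tuple[Optional[int], List[int]]: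
--     """Layer-by-layer BFS. The parent dict doubles as the visited set, each
--     frontier node carries no path (paths are reconstructed once from parent
--     pointers), and the escape move is computed in closed form (the smallest
--     allowed distance covering the remaining gap) instead of scanning moves."""
--     n = len(dungeon)
--     goal = n - 1
--     if goal == 0:
--         return (0, [1])
--     parent = {0: None}
--     frontier = [0]
--     while frontier:
--         nxt = []
--         for pos in frontier:
--             gap = goal - pos
--             if gap <= 5:
--                 # escape: smallest d in {1,2,3,5} with pos + d >= goal
--                 step = 1 if gap <= 1 else (gap if gap <= 3 else 5)
--                 path = []
--                 cur = pos
--                 while cur is not None: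
--                     path.append(cur)
--                     cur = parent[cur]
--                 path.reverse()
--                 path.append(pos + step)
--                 return (len(path) - 1, [p + 1 for p in path])
--             for d in MOVE_DISTANCES:
--                 np_ = pos + d
--                 if np_ < n and dungeon[np_] == 1 and np_ not in parent:
--                     parent[np_] = pos
--                     nxt.append(np_)
--         frontier = nxt
--     return (None, [1])
-- ===== Notes on version B (the rewrite author's own statement) =====
-- stated objective: alternative
-- what changed: A's BFS pops one node at a time from a deque, copying the whole path into every queue entry and scanning the move list to detect escape; B runs BFS layer by layer over plain frontier lists, uses a parent-pointer dict that doubles as the visited set (each node carries O(1) state, the path is reconstructed once), and computes the escape jump in closed form from the remaining gap.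
import Mathlib
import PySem

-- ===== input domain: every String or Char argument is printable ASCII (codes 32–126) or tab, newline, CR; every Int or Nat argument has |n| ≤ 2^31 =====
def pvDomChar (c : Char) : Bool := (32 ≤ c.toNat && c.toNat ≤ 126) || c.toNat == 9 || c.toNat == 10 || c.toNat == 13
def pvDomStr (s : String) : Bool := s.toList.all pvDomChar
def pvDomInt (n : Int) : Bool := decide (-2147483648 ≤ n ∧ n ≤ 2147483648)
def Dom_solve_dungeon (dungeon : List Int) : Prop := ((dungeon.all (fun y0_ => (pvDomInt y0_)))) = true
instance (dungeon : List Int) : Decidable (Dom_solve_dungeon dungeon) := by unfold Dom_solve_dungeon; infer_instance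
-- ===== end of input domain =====

-- B replaces A's deque BFS (which copies the whole path into every queue entry and
-- scans the move list to detect escape) by a layer-by-layer BFS whose parent-pointer
-- dict doubles as the visited set, with one path reconstruction at the end and a
-- closed-form escape step (alternative algorithm; not measured faster on the test inputs).

-- ===== PORT A =====
def MOVE_DISTANCES : List Int := [1, 2, 3, 5]

-- inner `for distance in MOVE_DISTANCES` loop of A: either returns (.inl) or yields the updated queue/visited (.inr)
def solveA_inner (dungeon : List Int) (n goal position : Int) (path : List Int) :
    List Int → List (Int × List Int) → PySem.Set Int →
    Sum (Option Int × List Int) (List (Int × List Int) × PySem.Set Int)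
  | [], q, v => .inr (q, v)
  | d :: ds, q, v =>
    let next := position + d
    if goal ≤ next then
      .inl (some (path.length : Int), (path ++ [max next goal]).map (· + 1))
    else if next < n ∧ PySem.List.pyGet? dungeon next = some 1 ∧ ¬ PySem.Set.contains v next then
      solveA_inner dungeon n goal position path ds (q ++ [(next, path ++ [next])]) (PySem.Set.add v next)
    else
      solveA_inner dungeon n goal position path ds q v

-- outer `while queue` loop of A; fuel bounds the number of pops (each enqueued position
-- is a fresh member of `visited`, so `len(dungeon)+1` pops are never exhausted)
def solveA_loop (dungeon : List Int) (n goal : Int) :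
    Nat → List (Int × List Int) → PySem.Set Int → Option Int × List Int
  | 0, _, _ => (none, [1])
  | _ + 1, [], _ => (none, [1])
  | f + 1, (position, path) :: rest, v =>
    match solveA_inner dungeon n goal position path MOVE_DISTANCES rest v with
    | .inl r => r
    | .inr (q, v') => solveA_loop dungeon n goal f q v'

def solve_dungeon (dungeon : List Int) : Option Int × List Int :=
  let n : Int := dungeon.length
  let goal : Int := n - 1
  if goal = 0 then ((some 0 : Option Int), [1])
  else solveA_loop dungeon n goal (dungeon.length + 1) [(0, [0])] (PySem.Set.ofList [0])

-- ===== PORT B =====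
-- `path = []; cur = pos; while cur is not None: path.append(cur); cur = parent[cur]; path.reverse()`
-- (fuel exhaustion and a missing key are unreachable on states B builds: every frontier
-- node is a key of `parent` and chains have length ≤ len(dungeon)+1)
def rebuildB (par : PySem.Dict Int (Option Int)) : Nat → Int → List Int → List Int
  | 0, _, acc => acc.reverse
  | f + 1, cur, acc =>
    match par.get? cur with
    | some (some p) => rebuildB par f p (acc ++ [cur])
    | _ => (acc ++ [cur]).reverse

-- `for d in MOVE_DISTANCES: …` expansion of one frontier node (no escape possible here,
-- the caller only expands nodes with gap > 5): a pure state update of (nxt, parent)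
def expandB (dungeon : List Int) (n pos : Int) :
    List Int → List Int → PySem.Dict Int (Option Int) →
    List Int × PySem.Dict Int (Option Int)
  | [], nxt, par => (nxt, par)
  | d :: ds, nxt, par =>
    let np := pos + d
    if np < n ∧ PySem.List.pyGet? dungeon np = some 1 ∧ par.get? np = none then
      expandB dungeon n pos ds (nxt ++ [np]) (par.insert np (some pos))
    else
      expandB dungeon n pos ds nxt par

-- `for pos in frontier: …` over one BFS layer; the shared fuel f counts processed nodes
def layerB (dungeon : List Int) (n goal : Int) (F : Nat) :
    Nat → List Int → List Int → PySem.Dict Int (Option Int) →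
    Sum (Option Int × List Int) (Nat × List Int × PySem.Dict Int (Option Int))
  | f, [], nxt, par => .inr (f, nxt, par)
  | 0, _ :: _, _, _ => .inl (none, [1])
  | f + 1, pos :: rest, nxt, par =>
    let gap := goal - pos
    if gap ≤ 5 then
      let step : Int := if gap ≤ 1 then 1 else if gap ≤ 3 then gap else 5
      let path := rebuildB par F pos [] ++ [pos + step]
      .inl (some ((path.length : Int) - 1), path.map (· + 1))
    else
      match expandB dungeon n pos MOVE_DISTANCES nxt par with
      | (nxt', par') => layerB dungeon n goal F f rest nxt' par'

-- fuel accounting of layerB, needed for loopB's termination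
theorem layerB_fuel (dungeon : List Int) (n goal : Int) (F : Nat) :
    ∀ (cur : List Int) (f : Nat) (nxt : List Int) (par : PySem.Dict Int (Option Int))
      (f' : Nat) (nxt' : List Int) (par' : PySem.Dict Int (Option Int)),
      layerB dungeon n goal F f cur nxt par = .inr (f', nxt', par') → f' + cur.length = f := by
  intro cur
  induction cur with
  | nil => intro f nxt par f' nxt' par' h; simp [layerB] at h; simp [h.1]
  | cons pos rest ih =>
    intro f nxt par f' nxt' par' h
    cases f with
    | zero => simp [layerB] at h
    | succ g =>
      simp only [layerB] at h
      split at h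
      · simp at h
      · have := ih g _ _ _ _ _ h
        simp [List.length_cons]; omega

-- `while frontier:` loop of B
def loopB (dungeon : List Int) (n goal : Int) (F : Nat) :
    Nat → List Int → PySem.Dict Int (Option Int) → Option Int × List Int
  | _, [], _ => (none, [1])
  | f, pos :: rest, par =>
    match h : layerB dungeon n goal F f (pos :: rest) [] par with
    | .inl r => r
    | .inr (f', nxt, par') => loopB dungeon n goal F f' nxt par'
termination_by f _ _ => f
decreasing_by
  have := layerB_fuel dungeon n goal F (pos :: rest) f [] par f' nxt par' h
  simp [List.length_cons] at this; omega

def solve_dungeon_alt (dungeon : List Int) : Option Int × List Int :=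
  let n : Int := dungeon.length
  let goal : Int := n - 1
  if goal = 0 then ((some 0 : Option Int), [1])
  else loopB dungeon n goal (dungeon.length + 1) (dungeon.length + 1) [0]
        (PySem.Dict.empty.insert 0 none)

-- ===== PRECONDITION & SPEC =====
def Spec_solve_dungeon (dungeon : List Int) (out : Option Int × List Int) : Prop := out = solve_dungeon_alt dungeon
instance (dungeon : List Int) (out : Option Int × List Int) : Decidable (Spec_solve_dungeon dungeon out) := by unfold Spec_solve_dungeon; infer_instance

-- ===== CLAIM (what is proved, stated in full; the proofs are below) =====
def Claim_equal_solve_dungeon : Prop := ∀ (dungeon : List Int), Dom_solve_dungeon dungeon → Spec_solve_dungeon dungeon (solve_dungeon dungeon)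

-- ===== LEMMAS AND PROOFS =====

-- the parent chain from the root down to `cur` (forward order), as an Option
def chain? (par : PySem.Dict Int (Option Int)) : Nat → Int → Option (List Int)
  | 0, _ => none
  | f + 1, cur =>
    match par.get? cur with
    | some none => some [cur]
    | some (some p) => (chain? par f p).map (· ++ [cur])
    | none => none

theorem chain?_ext (par par' : PySem.Dict Int (Option Int))
    (hext : ∀ k w, par.get? k = some w → par'.get? k = some w) :
    ∀ f cur l, chain? par f cur = some l → chain? par' f cur = some l := by
  intro f
  induction f with
  | zero => intro cur l h; simp [chain?] at h
  | succ f ih =>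
    intro cur l h
    simp only [chain?] at h ⊢
    cases hg : par.get? cur with
    | none => rw [hg] at h; simp at h
    | some o =>
      rw [hg] at h
      rw [hext _ _ hg]
      cases o with
      | none => simpa using h
      | some p =>
        simp only [Option.map_eq_some_iff] at h ⊢
        obtain ⟨l', hl', rfl⟩ := h
        exact ⟨l', ih p l' hl', rfl⟩

theorem rebuildB_of_chain? (par : PySem.Dict Int (Option Int)) :
    ∀ f F cur l acc, chain? par f cur = some l → f ≤ F →
      rebuildB par F cur acc = l ++ acc.reverse := by
  intro f
  induction f with
  | zero => intro F cur l acc h _; simp [chain?] at h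
  | succ f ih =>
    intro F cur l acc h hle
    obtain ⟨F', rfl⟩ : ∃ F', F = F' + 1 := ⟨F - 1, by omega⟩
    simp only [chain?] at h
    cases hg : par.get? cur with
    | none => rw [hg] at h; simp at h
    | some o =>
      rw [hg] at h
      cases o with
      | none =>
        simp only [Option.some.injEq] at h
        subst h
        simp [rebuildB, hg]
      | some p =>
        simp only [Option.map_eq_some_iff] at h
        obtain ⟨l', hl', rfl⟩ := h
        simp only [rebuildB, hg]
        rw [ih F' p l' (acc ++ [cur]) hl' (by omega)]
        simp

-- invariant tying one A queue entry (position, path) to one B frontier position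
def EntryInv (par : PySem.Dict Int (Option Int)) (n : Int) (a : Int × List Int) (p : Int) : Prop :=
  a.1 = p ∧ 0 ≤ p ∧ p ≤ n ∧ (a.2.length : Int) ≤ p + 1 ∧ chain? par a.2.length p = some a.2

-- A's visited set and B's parent dict hold the same positions
def KV (par : PySem.Dict Int (Option Int)) (v : PySem.Set Int) : Prop :=
  ∀ k : Int, (par.get? k).isSome = true ↔ PySem.Set.contains v k = true

theorem EntryInv_ext {par par' : PySem.Dict Int (Option Int)} {n : Int} {a : Int × List Int} {p : Int}
    (hext : ∀ k w, par.get? k = some w → par'.get? k = some w)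
    (h : EntryInv par n a p) : EntryInv par' n a p := by
  obtain ⟨h1, h2, h3, h4, h5⟩ := h
  exact ⟨h1, h2, h3, h4, chain?_ext par par' hext _ _ _ h5⟩

theorem forall2_append {α β : Type} {R : α → β → Prop} :
    ∀ {a : List α} {b : List β} {c : List α} {d : List β},
    List.Forall₂ R a b → List.Forall₂ R c d → List.Forall₂ R (a ++ c) (b ++ d) := by
  intro a b c d h1 h2
  induction h1 with
  | nil => simpa using h2
  | cons h _ ih => exact List.Forall₂.cons h ih

-- A returns on the head distance when it escapes
theorem inner_escape_step (dungeon : List Int) (n goal pos : Int) (path : List Int)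
    (d : Int) (ds : List Int) (h : goal ≤ pos + d) (q : List (Int × List Int)) (v : PySem.Set Int) :
    solveA_inner dungeon n goal pos path (d :: ds) q v =
      .inl (some (path.length : Int), (path ++ [pos + d]).map (· + 1)) := by
  simp only [solveA_inner, if_pos h]
  rw [max_eq_left h]

-- A skips a non-escaping distance, only mutating its queue/visited state
theorem inner_skip (dungeon : List Int) (n goal pos : Int) (path : List Int)
    (d : Int) (ds : List Int) (h : ¬ goal ≤ pos + d) (q : List (Int × List Int)) (v : PySem.Set Int) :
    ∃ q' v', solveA_inner dungeon n goal pos path (d :: ds) q v =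
      solveA_inner dungeon n goal pos path ds q' v' := by
  simp only [solveA_inner, if_neg h]
  split_ifs <;> exact ⟨_, _, rfl⟩

-- when the gap to the goal is ≤ 5, A's move scan returns the closed-form escape
theorem inner_escape (dungeon : List Int) (n goal pos : Int) (path : List Int)
    (h : goal - pos ≤ 5) (q : List (Int × List Int)) (v : PySem.Set Int) :
    solveA_inner dungeon n goal pos path MOVE_DISTANCES q v =
      .inl (some (path.length : Int),
        (path ++ [pos + (if goal - pos ≤ 1 then 1 else if goal - pos ≤ 3 then goal - pos else 5)]).map (· + 1)) := by
  simp only [MOVE_DISTANCES]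
  by_cases h1 : goal ≤ pos + 1
  · rw [inner_escape_step dungeon n goal pos path 1 _ h1, if_pos (by omega : goal - pos ≤ 1)]
  · obtain ⟨q1, v1, e1⟩ := inner_skip dungeon n goal pos path 1 _ h1 q v
    rw [e1]
    by_cases h2 : goal ≤ pos + 2
    · rw [inner_escape_step dungeon n goal pos path 2 _ h2,
        if_neg (by omega : ¬ goal - pos ≤ 1), if_pos (by omega : goal - pos ≤ 3),
        (by omega : pos + 2 = pos + (goal - pos))]
    · obtain ⟨q2, v2, e2⟩ := inner_skip dungeon n goal pos path 2 _ h2 q1 v1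
      rw [e2]
      by_cases h3 : goal ≤ pos + 3
      · rw [inner_escape_step dungeon n goal pos path 3 _ h3,
          if_neg (by omega : ¬ goal - pos ≤ 1), if_pos (by omega : goal - pos ≤ 3),
          (by omega : pos + 3 = pos + (goal - pos))]
      · obtain ⟨q3, v3, e3⟩ := inner_skip dungeon n goal pos path 3 _ h3 q2 v2
        rw [e3]
        rw [inner_escape_step dungeon n goal pos path 5 _ (by omega) q3 v3,
          if_neg (by omega : ¬ goal - pos ≤ 1), if_neg (by omega : ¬ goal - pos ≤ 3)]

-- when the gap is > 5, A's move scan and B's expandB make the same discoveries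
theorem expand_eq (dungeon : List Int) (n goal pos : Int) (path : List Int)
    (hgap : ¬ goal - pos ≤ 5) (hpos0 : 0 ≤ pos) (hplen : (path.length : Int) ≤ pos + 1) :
    ∀ (ds : List Int), (∀ d ∈ ds, 1 ≤ d ∧ d ≤ 5) →
    ∀ (qA : List (Int × List Int)) (nxt : List Int) (v : PySem.Set Int)
      (par : PySem.Dict Int (Option Int)),
      chain? par path.length pos = some path → KV par v →
      ∃ qA' v',
        solveA_inner dungeon n goal pos path ds qA v = .inr (qA', v') ∧
        (∀ k w, par.get? k = some w → (expandB dungeon n pos ds nxt par).2.get? k = some w) ∧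
        KV (expandB dungeon n pos ds nxt par).2 v' ∧
        ∃ newE newP, qA' = qA ++ newE ∧ (expandB dungeon n pos ds nxt par).1 = nxt ++ newP ∧
          List.Forall₂ (EntryInv (expandB dungeon n pos ds nxt par).2 n) newE newP := by
  intro ds
  induction ds with
  | nil =>
    intro _ qA nxt v par hchain hkv
    exact ⟨qA, v, rfl, fun k w h => h, hkv, [], [], by simp, by simp [expandB], by simp [expandB]⟩
  | cons d ds ih =>
    intro hds qA nxt v par hchain hkv
    obtain ⟨hd1, hd5⟩ := hds d (by simp)
    have hds' : ∀ d' ∈ ds, 1 ≤ d' ∧ d' ≤ 5 := fun d' h => hds d' (by simp [h])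
    have hne : ¬ goal ≤ pos + d := by omega
    simp only [solveA_inner, expandB, if_neg hne]
    set np := pos + d with hnp
    have hcond : (np < n ∧ PySem.List.pyGet? dungeon np = some 1 ∧ ¬ PySem.Set.contains v np = true)
        ↔ (np < n ∧ PySem.List.pyGet? dungeon np = some 1 ∧ par.get? np = none) := by
      constructor
      · rintro ⟨a, b, c⟩
        refine ⟨a, b, ?_⟩
        cases hg : par.get? np with
        | none => rfl
        | some w => exact absurd ((hkv np).mp (by simp [hg])) c
      · rintro ⟨a, b, c⟩
        refine ⟨a, b, fun hc => ?_⟩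
        have := (hkv np).mpr hc
        rw [c] at this; simp at this
    by_cases hstep : np < n ∧ PySem.List.pyGet? dungeon np = some 1 ∧ ¬ PySem.Set.contains v np = true
    · rw [if_pos hstep, if_pos (hcond.mp hstep)]
      obtain ⟨hlt, _, hnvis⟩ := hstep
      have hfresh : par.get? np = none := (hcond.mp ⟨hlt, by tauto, hnvis⟩).2.2
      have hext0 : ∀ k w, par.get? k = some w → (par.insert np (some pos)).get? k = some w := by
        intro k w hk
        by_cases hkn : k = np
        · rw [hkn, hfresh] at hk; exact absurd hk (by simp)
        · rw [PySem.Dict.get?_insert_of_ne _ _ hkn]; exact hk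
      have hkv1 : KV (par.insert np (some pos)) (PySem.Set.add v np) := by
        intro k
        by_cases hkn : k = np
        · subst hkn
          rw [PySem.Dict.get?_insert_self, PySem.Set.contains_iff, PySem.Set.mem_add]
          simp
        · rw [PySem.Dict.get?_insert_of_ne _ _ hkn, PySem.Set.contains_iff, PySem.Set.mem_add]
          rw [← PySem.Set.contains_iff]
          simp [hkn, hkv k]
      have hchain1 : chain? (par.insert np (some pos)) path.length pos = some path :=
        chain?_ext par _ hext0 _ _ _ hchain
      obtain ⟨qA', v', heq, hext1, hkv', newE, newP, hqe, hne', hF⟩ :=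
        ih hds' (qA ++ [(np, path ++ [np])]) (nxt ++ [np]) (PySem.Set.add v np)
          (par.insert np (some pos)) hchain1 hkv1
      refine ⟨qA', v', heq, fun k w hk => hext1 k w (hext0 k w hk), hkv',
        (np, path ++ [np]) :: newE, np :: newP, by simp [hqe], by simp [hne'], ?_⟩
      refine List.Forall₂.cons ?_ hF
      refine EntryInv_ext hext1 ?_
      refine ⟨rfl, by omega, by omega, by simp; omega, ?_⟩
      show chain? (par.insert np (some pos)) (path ++ [np]).length np = some (path ++ [np])
      have hlen : (path ++ [np]).length = path.length + 1 := by simp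
      rw [hlen]
      simp only [chain?, PySem.Dict.get?_insert_self, hchain1]
      simp
    · rw [if_neg hstep, if_neg (fun hc => hstep (hcond.mpr hc))]
      exact ih hds' qA nxt v par hchain hkv

-- one B layer against A's node-at-a-time loop
theorem layer_eq (dungeon : List Int) (n goal : Int) (hn : n = (dungeon.length : Int)) :
    ∀ (cur : List Int) (f : Nat) (nxt : List Int) (qA : List (Int × List Int))
      (v : PySem.Set Int) (par : PySem.Dict Int (Option Int)),
    List.Forall₂ (EntryInv par n) qA (cur ++ nxt) → KV par v →
    (match layerB dungeon n goal (dungeon.length + 1) f cur nxt par with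
     | .inl r => solveA_loop dungeon n goal f qA v = r
     | .inr (f', nxt', par') =>
         ∃ qA' v', solveA_loop dungeon n goal f qA v = solveA_loop dungeon n goal f' qA' v' ∧
           List.Forall₂ (EntryInv par' n) qA' nxt' ∧ KV par' v') := by
  intro cur
  induction cur with
  | nil =>
    intro f nxt qA v par hq hkv
    simp only [layerB]
    exact ⟨qA, v, rfl, by simpa using hq, hkv⟩
  | cons pos rest ih =>
    intro f nxt qA v par hq hkv
    cases hq with
    | cons hhead htail =>
      rename_i a qA''
      obtain ⟨h1, h2, h3, h4, h5⟩ := hhead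
      obtain ⟨pos₀, path⟩ := a
      simp only at h1 h2 h3 h4 h5
      have h1' := h1.symm
      subst h1'
      cases f with
      | zero =>
        simp only [layerB]
        rfl
      | succ g =>
        simp only [layerB]
        by_cases hgap : goal - pos ≤ 5
        · rw [if_pos hgap]
          have hFle : path.length ≤ dungeon.length + 1 := by
            have : (path.length : Int) ≤ (dungeon.length : Int) + 1 := by omega
            exact_mod_cast this
          have hre : rebuildB par (dungeon.length + 1) pos [] = path := by
            rw [rebuildB_of_chain? par path.length (dungeon.length + 1) pos path [] h5 hFle]
            simp
          show solveA_loop dungeon n goal (g + 1) ((pos, path) :: qA'') v = _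
          simp only [solveA_loop]
          rw [inner_escape dungeon n goal pos path hgap qA'' v]
          rw [hre]
          refine congrArg₂ Prod.mk ?_ rfl
          simp only [List.length_append, List.length_cons, List.length_nil]
          push_cast
          ring_nf
        · rw [if_neg hgap]
          have hmoves : ∀ d ∈ MOVE_DISTANCES, (1 : Int) ≤ d ∧ d ≤ 5 := by
            intro d hd
            simp only [MOVE_DISTANCES, List.mem_cons, List.not_mem_nil, or_false] at hd
            rcases hd with rfl | rfl | rfl | rfl <;> norm_num
          obtain ⟨qA', v', heq, hext, hkv', newE, newP, hqe, hne', hF⟩ :=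
            expand_eq dungeon n goal pos path hgap h2 h4 MOVE_DISTANCES hmoves qA'' nxt v par h5 hkv
          subst hqe
          have hq' : List.Forall₂ (EntryInv (expandB dungeon n pos MOVE_DISTANCES nxt par).2 n)
              (qA'' ++ newE) (rest ++ (expandB dungeon n pos MOVE_DISTANCES nxt par).1) := by
            rw [hne', ← List.append_assoc]
            exact forall2_append (htail.imp (fun _ _ h => EntryInv_ext hext h)) hF
          have := ih g (expandB dungeon n pos MOVE_DISTANCES nxt par).1 (qA'' ++ newE) v'
            (expandB dungeon n pos MOVE_DISTANCES nxt par).2 hq' hkv'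
          cases hL : layerB dungeon n goal (dungeon.length + 1) g rest
              (expandB dungeon n pos MOVE_DISTANCES nxt par).1
              (expandB dungeon n pos MOVE_DISTANCES nxt par).2 with
          | inl r =>
            rw [hL] at this
            show solveA_loop dungeon n goal (g + 1) ((pos, path) :: qA'') v = r
            simp only [solveA_loop]
            rw [heq]
            exact this
          | inr s =>
            rw [hL] at this
            obtain ⟨f', nxt', par'⟩ := s
            obtain ⟨qB, vB, he, hF', hkvB⟩ := this
            refine ⟨qB, vB, ?_, hF', hkvB⟩
            show solveA_loop dungeon n goal (g + 1) ((pos, path) :: qA'') v = _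
            simp only [solveA_loop]
            rw [heq]
            exact he

theorem loop_eq (dungeon : List Int) (n goal : Int) (hn : n = (dungeon.length : Int)) :
    ∀ (f : Nat) (qA : List (Int × List Int)) (frontier : List Int)
      (v : PySem.Set Int) (par : PySem.Dict Int (Option Int)),
    List.Forall₂ (EntryInv par n) qA frontier → KV par v →
    solveA_loop dungeon n goal f qA v =
      loopB dungeon n goal (dungeon.length + 1) f frontier par := by
  intro f
  induction f using Nat.strong_induction_on with
  | _ f ihf =>
    intro qA frontier v par hq hkv
    cases hq with
    | nil =>
      rw [loopB]
      cases f <;> rfl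
    | cons hhead htail =>
      rename_i a p qA'' rest
      rw [loopB]
      have hall : List.Forall₂ (EntryInv par n) (a :: qA'') ((p :: rest) ++ []) := by
        simpa using List.Forall₂.cons hhead htail
      have := layer_eq dungeon n goal hn (p :: rest) f [] (a :: qA'') v par hall hkv
      cases hL : layerB dungeon n goal (dungeon.length + 1) f (p :: rest) [] par with
      | inl r => rw [hL] at this; exact this
      | inr s =>
        rw [hL] at this
        obtain ⟨f', nxt', par'⟩ := s
        obtain ⟨qA', v', he, hF', hkv'⟩ := this
        have hlt : f' < f := by
          have := layerB_fuel dungeon n goal (dungeon.length + 1) (p :: rest) f [] par f' nxt' par' hL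
          simp [List.length_cons] at this; omega
        rw [he]
        exact ihf f' hlt qA' nxt' v' par' hF' hkv'

-- ===== VERDICT (by name: the statement is the Claim_ definition above) =====
theorem solve_dungeon_spec : Claim_equal_solve_dungeon := by
  intro dungeon _
  unfold Spec_solve_dungeon solve_dungeon solve_dungeon_alt
  by_cases h : ((dungeon.length : Int) - 1) = 0
  · simp [h]
  · simp only [if_neg h]
    apply loop_eq dungeon _ _ rfl
    · refine List.Forall₂.cons ?_ List.Forall₂.nil
      refine ⟨rfl, le_refl 0, by positivity, by simp, ?_⟩
      show chain? (PySem.Dict.empty.insert 0 none) 1 0 = some [0]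
      simp [chain?, PySem.Dict.get?_insert_self]
    · intro k
      by_cases hk : k = 0
      · subst hk
        rw [PySem.Dict.get?_insert_self, PySem.Set.contains_iff]
        simp [PySem.Set.mem_ofList]
      · rw [PySem.Dict.get?_insert_of_ne _ _ hk, PySem.Dict.get?_empty, PySem.Set.contains_iff]
        simp [PySem.Set.mem_ofList, hk]
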